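-- pv_equiv track=rewrite | github.com/Wiki-Draco/wiki-draco | _reorganize_compendium.py | reindent
-- ===== SOURCE A (Python) =====
-- def reindent(raw):
--     lines = raw.split('\n')
--     out = []
--     for i, line in enumerate(lines):
--         stripped = line.lstrip()
--         if i == 0 or i == len(lines) - 1:
--             out.append('  ' + stripped)   # { et }
--         else:
--             out.append('    ' + stripped) # propriétés
--     return '\n'.join(out)
--
-- out = '\n'
-- ===== SOURCE B (Python) =====
-- def _tail(ls):
--     # ls nonempty: all lines get 4 spaces except the final one, which gets 2
--     if len(ls) == 1:
--         return '  ' + ls[0].lstrip()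
--     return '    ' + ls[0].lstrip() + '\n' + _tail(ls[1:])
--
-- def reindent(raw):
--     lines = raw.split('\n')
--     if len(lines) == 1:
--         return '  ' + lines[0].lstrip()
--     return '  ' + lines[0].lstrip() + '\n' + _tail(lines[1:])
-- ===== Notes on version B (the rewrite author's own statement) =====
-- stated objective: alternative
-- what changed: Replaces A's indexed loop (enumerate with i==0/i==len-1 tests, list accumulator, final join) by direct structural recursion: the first line is emitted with 2 spaces, then a recursive helper builds the rest of the string by concatenation, indenting each line with 4 spaces except the base-case last line which gets 2.
import Mathlib
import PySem

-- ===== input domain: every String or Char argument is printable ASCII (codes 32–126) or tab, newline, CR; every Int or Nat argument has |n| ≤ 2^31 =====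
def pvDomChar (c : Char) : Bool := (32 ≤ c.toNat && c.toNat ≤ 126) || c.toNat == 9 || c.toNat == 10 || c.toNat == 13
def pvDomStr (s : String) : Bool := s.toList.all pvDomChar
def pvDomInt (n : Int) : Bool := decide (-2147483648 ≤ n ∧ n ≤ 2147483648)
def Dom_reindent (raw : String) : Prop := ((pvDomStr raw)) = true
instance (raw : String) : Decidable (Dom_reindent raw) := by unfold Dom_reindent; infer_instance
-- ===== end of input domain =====

-- B replaces A's indexed loop + list accumulator + join by direct structural recursion
-- that builds the output string by concatenation; objective: alternative decomposition.

-- ===== PORT A =====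
def reindent (raw : String) : String :=
  let lines := (PySem.Str.split? raw "\n").getD []
  let out := (PySem.List.enumerate lines 0).foldl
    (fun out p =>
      let stripped := PySem.Str.lstrip p.2
      if p.1 = 0 ∨ p.1 = (lines.length : Int) - 1 then out ++ ["  " ++ stripped]
      else out ++ ["    " ++ stripped]) ([] : List String)
  PySem.Str.join "\n" out

-- ===== PORT B =====
-- B's recursive helper _tail (the [] case is unreachable: _tail is only called on nonempty lists)
def reindentTail : List String → String
  | [] => ""
  | [x] => "  " ++ PySem.Str.lstrip x
  | x :: y :: t => "    " ++ PySem.Str.lstrip x ++ "\n" ++ reindentTail (y :: t)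

def reindent_alt (raw : String) : String :=
  let lines := (PySem.Str.split? raw "\n").getD []
  if lines.length = 1 then
    "  " ++ PySem.Str.lstrip (PySem.List.pyGetD lines 0 "")
  else
    "  " ++ PySem.Str.lstrip (PySem.List.pyGetD lines 0 "") ++ "\n" ++
      reindentTail (PySem.List.slice lines (some 1) none)

-- ===== PRECONDITION & SPEC =====
def Spec_reindent (raw : String) (out : String) : Prop := out = reindent_alt raw
instance (raw : String) (out : String) : Decidable (Spec_reindent raw out) := by unfold Spec_reindent; infer_instance

-- ===== CLAIM (what is proved, stated in full; the proofs are below) =====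
def Claim_equal_reindent : Prop := ∀ (raw : String), Dom_reindent raw → Spec_reindent raw (reindent raw)

-- ===== LEMMAS AND PROOFS =====

lemma go_ne_nil (sep : List Char) : ∀ (fuel : Nat) (l cur : List Char) (acc : List (List Char)),
    PySem.Chars.splitOn.go sep fuel l cur acc ≠ [] := by
  intro fuel
  induction fuel with
  | zero => intro l cur acc; rw [PySem.Chars.splitOn.go]; simp
  | succ n ih =>
    intro l cur acc
    match l with
    | [] => rw [PySem.Chars.splitOn.go]; simp; omega
    | c :: rest =>
      rw [PySem.Chars.splitOn.go]
      split
      · exact ih _ _ _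
      · exact ih _ _ _

lemma splitOn_ne_nil (s sep : List Char) : PySem.Chars.splitOn s sep ≠ [] := by
  rw [PySem.Chars.splitOn]; exact go_ne_nil sep _ _ _ _

lemma split_getD_ne_nil (raw : String) : (PySem.Str.split? raw "\n").getD [] ≠ [] := by
  simp [PySem.Str.split?, PySem.Chars.split?]
  intro h
  exact splitOn_ne_nil _ _ h

lemma str_join_singleton (sep x : String) : PySem.Str.join sep [x] = x := by
  have h := PySem.Str.toList_join sep [x]
  rw [List.map_singleton, PySem.Chars.join_singleton] at h
  exact String.toList_inj.mp h

lemma str_join_cons_of_ne_nil (sep x : String) (l : List String) (h : l ≠ []) :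
    PySem.Str.join sep (x :: l) = x ++ sep ++ PySem.Str.join sep l := by
  match l, h with
  | y :: t, _ =>
    apply String.toList_inj.mp
    rw [PySem.Str.toList_join]
    simp only [List.map_cons, PySem.Chars.join_cons_cons, String.toList_append,
      PySem.Str.toList_join, List.map_cons]

lemma reindentTail_cons (x : String) (l : List String) (h : l ≠ []) :
    reindentTail (x :: l) = "    " ++ PySem.Str.lstrip x ++ "\n" ++ reindentTail l := by
  match l, h with
  | y :: t, _ => rfl

-- B's helper computes exactly the join of A's middle/last region
lemma reindentTail_eq_join : ∀ (ys : List String) (z : String),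
    reindentTail (ys ++ [z]) =
      PySem.Str.join "\n" (ys.map (fun l => "    " ++ PySem.Str.lstrip l)
        ++ ["  " ++ PySem.Str.lstrip z]) := by
  intro ys
  induction ys with
  | nil => intro z; simp [reindentTail, str_join_singleton]
  | cons y ys ih =>
    intro z
    rw [List.cons_append, reindentTail_cons y (ys ++ [z]) (by simp), ih,
      List.map_cons, List.cons_append,
      str_join_cons_of_ne_nil _ _ _ (by simp)]

-- the middle region of A's loop: indices s..n-2 get four spaces, index n-1 gets two
lemma mid_map (n : Int) : ∀ (ys : List String) (z : String) (s : Int), 1 ≤ s →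
    s + (ys.length : Int) = n - 1 →
    (PySem.List.enumerate (ys ++ [z]) s).map
      (fun p => if p.1 = 0 ∨ p.1 = n - 1 then "  " ++ PySem.Str.lstrip p.2
                else "    " ++ PySem.Str.lstrip p.2)
    = ys.map (fun l => "    " ++ PySem.Str.lstrip l) ++ ["  " ++ PySem.Str.lstrip z] := by
  intro ys
  induction ys with
  | nil =>
    intro z s h1 h2
    have hs : s = n - 1 := by simp only [List.length_nil, Nat.cast_zero, add_zero] at h2; omega
    simp [PySem.List.enumerate_cons, PySem.List.enumerate_nil, hs]
  | cons y ys ih =>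
    intro z s h1 h2
    have hne0 : ¬ (s = 0 ∨ s = n - 1) := by
      simp only [List.length_cons, Nat.cast_add, Nat.cast_one] at h2
      omega
    simp only [List.cons_append, PySem.List.enumerate_cons, List.map_cons]
    rw [ih z (s + 1) (by omega) (by simp only [List.length_cons, Nat.cast_add, Nat.cast_one] at h2; omega)]
    simp [hne0]

-- ===== VERDICT (by name: the statement is the Claim_ definition above) =====
theorem reindent_spec : Claim_equal_reindent := by
  intro raw _
  unfold Spec_reindent reindent reindent_alt
  simp only []
  generalize hL : (PySem.Str.split? raw "\n").getD [] = L
  have hne : L ≠ [] := by rw [← hL]; exact split_getD_ne_nil raw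
  -- rewrite A's loop as a map
  have hfold : ∀ (M : List String) (n : Int),
      (PySem.List.enumerate M 0).foldl
        (fun out p =>
          if p.1 = 0 ∨ p.1 = n - 1 then out ++ ["  " ++ PySem.Str.lstrip p.2]
          else out ++ ["    " ++ PySem.Str.lstrip p.2]) [] =
      (PySem.List.enumerate M 0).map
        (fun p => if p.1 = 0 ∨ p.1 = n - 1 then "  " ++ PySem.Str.lstrip p.2
                  else "    " ++ PySem.Str.lstrip p.2) := by
    intro M n
    have hf : (fun (out : List String) (p : Int × String) =>
        if p.1 = 0 ∨ p.1 = n - 1 then out ++ ["  " ++ PySem.Str.lstrip p.2]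
        else out ++ ["    " ++ PySem.Str.lstrip p.2]) =
        (fun out p => out ++ [if p.1 = 0 ∨ p.1 = n - 1 then "  " ++ PySem.Str.lstrip p.2
                              else "    " ++ PySem.Str.lstrip p.2]) := by
      funext out p; split <;> rfl
    rw [hf, PySem.List.foldl_append_singleton_eq_map]
    simp
  match L, hne with
  | [x], _ =>
    rw [hfold [x] (([x].length : Nat) : Int)]
    simp [PySem.List.enumerate_cons, PySem.List.enumerate_nil, PySem.List.pyGetD_zero_cons,
      str_join_singleton]
  | x :: y :: t, _ =>
    rcases List.eq_nil_or_concat (y :: t) with hc | ⟨ys, z, hyz⟩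
    · simp at hc
    rw [List.concat_eq_append] at hyz
    rw [hyz]
    have hlen : ¬ ((x :: (ys ++ [z])).length = 1) := by simp
    rw [if_neg hlen, hfold (x :: (ys ++ [z])) ((x :: (ys ++ [z])).length : Int)]
    rw [PySem.List.enumerate_cons]
    simp only [List.map_cons, zero_add]
    rw [mid_map ((x :: (ys ++ [z])).length : Int) ys z 1 (by omega) (by simp [add_comm])]
    have hfirst : PySem.List.pyGetD (x :: (ys ++ [z])) 0 "" = x :=
      PySem.List.pyGetD_zero_cons _ _ _
    have hmid : PySem.List.slice (x :: (ys ++ [z])) (some 1) none = ys ++ [z] := by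
      rw [PySem.List.slice_from _ (by omega)]
      simp
    rw [hfirst, hmid, reindentTail_eq_join,
      str_join_cons_of_ne_nil _ _ _ (by simp)]
    simp
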